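-- pv_equiv track=rewrite | github.com/victortvalderrama/bill_parser | clarogt_validacion/helpers.py | remove_string_segments
-- ===== SOURCE A (Python) =====
-- def remove_string_segments(string, range_list):
--     res = ""
--     for idx, chr in enumerate(string):
--         for strt_idx, end_idx in range_list:
--             if strt_idx <= idx +1 <= end_idx:
--                 break
--         else:
--             res += chr
--     return res.split()
-- ===== SOURCE B (Python) =====
-- def remove_string_segments(string, range_list):
--     # Precompute the set of removed 1-based indices once (O(n + spans)),
--     # then keep chars in a single pass; A rescans range_list per char.
--     n = len(string)
--     removed = set()
--     for strt_idx, end_idx in range_list: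
--         removed.update(range(max(strt_idx, 1), min(end_idx, n) + 1))
--     return "".join(c for i, c in enumerate(string, 1) if i not in removed).split()
-- ===== Notes on version B (the rewrite author's own statement) =====
-- stated objective: faster
-- what changed: Instead of scanning range_list for every character, B precomputes once the set of removed 1-based indices (ranges clipped to [1,n]) and keeps characters in a single pass with O(1) membership tests.
import Mathlib
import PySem

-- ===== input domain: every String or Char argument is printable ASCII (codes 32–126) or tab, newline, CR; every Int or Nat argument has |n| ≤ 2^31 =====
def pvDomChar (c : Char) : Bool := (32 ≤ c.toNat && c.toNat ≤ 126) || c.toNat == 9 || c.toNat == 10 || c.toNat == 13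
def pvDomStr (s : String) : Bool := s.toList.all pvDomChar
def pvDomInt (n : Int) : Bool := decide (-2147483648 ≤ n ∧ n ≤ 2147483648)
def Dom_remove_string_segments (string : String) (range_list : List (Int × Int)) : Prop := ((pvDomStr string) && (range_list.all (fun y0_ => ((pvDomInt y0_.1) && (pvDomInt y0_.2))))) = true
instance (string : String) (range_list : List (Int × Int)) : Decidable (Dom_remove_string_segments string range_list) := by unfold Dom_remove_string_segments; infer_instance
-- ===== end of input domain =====

-- B precomputes the set of removed 1-based indices once and filters in one pass; A rescans range_list per character. Proved: same return value on all of Dom.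


-- ===== PORT A =====
-- the inner 'for … break / else' loop: true iff some range contains i (first match stops the scan)
def rssHit (range_list : List (Int × Int)) (i : Int) : Bool :=
  match range_list with
  | [] => false
  | p :: rest => if p.1 ≤ i ∧ i ≤ p.2 then true else rssHit rest i

def remove_string_segments (string : String) (range_list : List (Int × Int)) : List String :=
  let res : List Char := (PySem.List.enumerate string.toList 0).foldl
    (fun res ic => if rssHit range_list (ic.1 + 1) then res else res ++ [ic.2]) []
  PySem.Str.split₀ (String.ofList res)

-- ===== PORT B =====
def remove_string_segments_alt (string : String) (range_list : List (Int × Int)) : List String :=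
  let n : Int := PySem.Str.len string
  let removed : PySem.Set Int := range_list.foldl
    (fun acc p => PySem.Set.update acc (PySem.List.pyRange (max p.1 1) (min p.2 n + 1))) PySem.Set.empty
  let kept : List Char := (PySem.List.enumerate string.toList 1).foldl
    (fun acc ic => if PySem.Set.contains removed ic.1 then acc else acc ++ [ic.2]) []
  PySem.Str.split₀ (String.ofList kept)

-- ===== PRECONDITION & SPEC =====
def Spec_remove_string_segments (string : String) (range_list : List (Int × Int)) (out : List String) : Prop := out = remove_string_segments_alt string range_list
instance (string : String) (range_list : List (Int × Int)) (out : List String) : Decidable (Spec_remove_string_segments string range_list out) := by unfold Spec_remove_string_segments; infer_instance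

-- ===== CLAIM (what is proved, stated in full; the proofs are below) =====
def Claim_equal_remove_string_segments : Prop := ∀ (string : String) (range_list : List (Int × Int)), Dom_remove_string_segments string range_list → Spec_remove_string_segments string range_list (remove_string_segments string range_list)

-- ===== LEMMAS AND PROOFS =====

theorem rssHit_iff (l : List (Int × Int)) (i : Int) :
    rssHit l i = true ↔ ∃ p ∈ l, p.1 ≤ i ∧ i ≤ p.2 := by
  induction l with
  | nil => simp [rssHit]
  | cons p rest ih =>
    simp only [rssHit]
    split_ifs with h
    · simp only [true_iff]; exact ⟨p, List.mem_cons_self, h⟩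
    · simp [ih, h]

theorem mem_removed (l : List (Int × Int)) (n : Int) (s : PySem.Set Int) (x : Int) :
    x ∈ l.foldl (fun acc p => PySem.Set.update acc (PySem.List.pyRange (max p.1 1) (min p.2 n + 1))) s
      ↔ x ∈ s ∨ ∃ p ∈ l, max p.1 1 ≤ x ∧ x ≤ min p.2 n := by
  induction l generalizing s with
  | nil => simp
  | cons p rest ih =>
    simp only [List.foldl_cons, ih, PySem.Set.mem_update, PySem.List.mem_pyRange_one,
      List.mem_cons]
    constructor
    · rintro ((h | h) | ⟨q, hq, h1, h2⟩)
      · exact Or.inl h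
      · exact Or.inr ⟨p, Or.inl rfl, h.1, by omega⟩
      · exact Or.inr ⟨q, Or.inr hq, h1, h2⟩
    · rintro (h | ⟨q, (rfl | hq), h1, h2⟩)
      · exact Or.inl (Or.inl h)
      · exact Or.inl (Or.inr ⟨h1, by omega⟩)
      · exact Or.inr ⟨q, hq, h1, h2⟩

-- the two filtered folds agree when the predicates agree on the visited indices
theorem loop_eq (P Q : Int → Bool) (cs : List Char) :
    ∀ (k : Int) (acc : List Char),
    (∀ i : Int, k + 1 ≤ i → i ≤ k + cs.length → P i = Q i) →
    (PySem.List.enumerate cs k).foldl (fun acc ic => if P (ic.1 + 1) then acc else acc ++ [ic.2]) acc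
      = (PySem.List.enumerate cs (k + 1)).foldl (fun acc ic => if Q ic.1 then acc else acc ++ [ic.2]) acc := by
  induction cs with
  | nil => intro k acc _; simp [PySem.List.enumerate_nil]
  | cons c cs ih =>
    intro k acc h
    simp only [PySem.List.enumerate_cons, List.foldl_cons]
    have hk : P (k + 1) = Q (k + 1) := h (k + 1) le_rfl (by simp only [List.length_cons]; push_cast; omega)
    rw [hk]
    exact ih (k + 1) _ (fun i h1 h2 => h i (by omega) (by simp at h2 ⊢; omega))

theorem remove_string_segments_spec' (string : String) (range_list : List (Int × Int)) :
    remove_string_segments string range_list = remove_string_segments_alt string range_list := by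
  unfold remove_string_segments remove_string_segments_alt
  simp only []
  have key := loop_eq (rssHit range_list)
      (fun i => PySem.Set.contains
        (range_list.foldl (fun acc p => PySem.Set.update acc
          (PySem.List.pyRange (max p.1 1) (min p.2 (PySem.Str.len string) + 1))) PySem.Set.empty) i)
      string.toList 0 [] ?_
  · simp only [zero_add] at key
    exact congrArg (fun cs => PySem.Str.split₀ (String.ofList cs)) key
  · intro i h1 h2
    simp only [PySem.Str.len_eq] at h2 ⊢
    by_cases hhit : ∃ p ∈ range_list, p.1 ≤ i ∧ i ≤ p.2
    · have hA : rssHit range_list i = true := (rssHit_iff _ _).mpr hhit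
      have hB : PySem.Set.contains
          (range_list.foldl (fun acc p => PySem.Set.update acc
            (PySem.List.pyRange (max p.1 1) (min p.2 ((string.toList.length : Int)) + 1))) PySem.Set.empty) i = true := by
        rw [PySem.Set.contains_iff, mem_removed]
        obtain ⟨p, hp, ha, hb⟩ := hhit
        exact Or.inr ⟨p, hp, by omega, by omega⟩
      rw [hA, hB]
    · have hA : rssHit range_list i = false := by
        rw [← Bool.not_eq_true, rssHit_iff]; exact hhit
      have hB : PySem.Set.contains
          (range_list.foldl (fun acc p => PySem.Set.update acc
            (PySem.List.pyRange (max p.1 1) (min p.2 ((string.toList.length : Int)) + 1))) PySem.Set.empty) i = false := by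
        rw [← Bool.not_eq_true, PySem.Set.contains_iff, mem_removed]
        rintro (h | ⟨p, hp, ha, hb⟩)
        · simp [PySem.Set.empty] at h
        · exact hhit ⟨p, hp, by omega, by omega⟩
      rw [hA, hB]

-- ===== VERDICT (by name: the statement is the Claim_ definition above) =====
theorem remove_string_segments_spec : Claim_equal_remove_string_segments := by
  intro string range_list _
  exact remove_string_segments_spec' string range_list
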